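-- pv_equiv track=rewrite | github.com/shhuan1989/algorithms | codechef/DODE2018_NEWS.py | solve
-- ===== SOURCE A (Python) =====
-- def solve(N, V1, V2, steps):
--     v = V1
--     spy = True
--     r, c = 0, 0
--     for s in steps:
--         if s == '*':
--             spy = not spy
--             v = V1 if spy else V2
--         else:
--             if s == 'N':
--                 r -= v
--             elif s == 'S':
--                 r += v
--             elif s == 'W':
--                 c -= v
--             else:
--                 c += v
--
--     d = max(abs(r), abs(c))
--     if d % 2 == 0:
--         return 'B'
--     else:
--         return 'W'
-- ===== SOURCE B (Python) =====
-- def solve(N, V1, V2, steps):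
--     # Tally moves per direction and per velocity-phase (parity of '*' seen),
--     # then compute the net displacement once at the end.
--     n1 = s1 = w1 = e1 = 0
--     n2 = s2 = w2 = e2 = 0
--     spy = True
--     for s in steps:
--         if s == '*':
--             spy = not spy
--         elif spy:
--             if s == 'N': n1 += 1
--             elif s == 'S': s1 += 1
--             elif s == 'W': w1 += 1
--             else: e1 += 1
--         else:
--             if s == 'N': n2 += 1
--             elif s == 'S': s2 += 1
--             elif s == 'W': w2 += 1
--             else: e2 += 1
--     r = V1 * (s1 - n1) + V2 * (s2 - n2)
--     c = V1 * (e1 - w1) + V2 * (e2 - w2)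
--     return 'B' if max(abs(r), abs(c)) % 2 == 0 else 'W'
-- ===== Notes on version B (the rewrite author's own statement) =====
-- stated objective: alternative
-- what changed: B keeps no running position or velocity: it tallies counts of each move per velocity-phase (parity of '*' seen so far) and computes the net row/column displacement with one arithmetic formula after the loop, instead of A's step-by-step position update with a tracked velocity variable.
import Mathlib
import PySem

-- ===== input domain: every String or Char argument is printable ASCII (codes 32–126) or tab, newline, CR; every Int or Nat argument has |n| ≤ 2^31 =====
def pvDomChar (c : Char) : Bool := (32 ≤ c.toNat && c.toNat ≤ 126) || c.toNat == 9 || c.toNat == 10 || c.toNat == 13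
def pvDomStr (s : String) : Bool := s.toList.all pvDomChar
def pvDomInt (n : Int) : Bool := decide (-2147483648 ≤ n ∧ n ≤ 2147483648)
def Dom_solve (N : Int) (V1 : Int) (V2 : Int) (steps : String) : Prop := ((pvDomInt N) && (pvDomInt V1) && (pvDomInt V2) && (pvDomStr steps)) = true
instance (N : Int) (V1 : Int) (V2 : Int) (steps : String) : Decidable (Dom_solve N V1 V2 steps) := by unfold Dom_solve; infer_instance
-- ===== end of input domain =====

-- B replaces A's running-position simulation by per-phase move tallies combined once after the loop (alternative decomposition, same O(n) cost).


-- ===== PORT A =====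
-- A's loop state: (v, spy, r, c), updated per character exactly as the Python does.
def stepA (V1 V2 : Int) (st : Int × Bool × Int × Int) (s : Char) : Int × Bool × Int × Int :=
  let (v, spy, r, c) := st
  if s = '*' then
    let spy' := !spy
    (if spy' then V1 else V2, spy', r, c)
  else if s = 'N' then (v, spy, r - v, c)
  else if s = 'S' then (v, spy, r + v, c)
  else if s = 'W' then (v, spy, r, c - v)
  else (v, spy, r, c + v)

def solve (N : Int) (V1 : Int) (V2 : Int) (steps : String) : String :=
  let st := steps.toList.foldl (stepA V1 V2) (V1, true, 0, 0)
  let d := max |st.2.2.1| |st.2.2.2|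
  if PySem.Int.mod d 2 = 0 then "B" else "W"

-- ===== PORT B =====
-- B's loop state: (spy, n1, s1, w1, e1, n2, s2, w2, e2) — pure tallies, no position.
def stepB (st : Bool × Int × Int × Int × Int × Int × Int × Int × Int) (s : Char) :
    Bool × Int × Int × Int × Int × Int × Int × Int × Int :=
  let (spy, n1, s1, w1, e1, n2, s2, w2, e2) := st
  if s = '*' then (!spy, n1, s1, w1, e1, n2, s2, w2, e2)
  else if spy then
    if s = 'N' then (spy, n1 + 1, s1, w1, e1, n2, s2, w2, e2)
    else if s = 'S' then (spy, n1, s1 + 1, w1, e1, n2, s2, w2, e2)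
    else if s = 'W' then (spy, n1, s1, w1 + 1, e1, n2, s2, w2, e2)
    else (spy, n1, s1, w1, e1 + 1, n2, s2, w2, e2)
  else
    if s = 'N' then (spy, n1, s1, w1, e1, n2 + 1, s2, w2, e2)
    else if s = 'S' then (spy, n1, s1, w1, e1, n2, s2 + 1, w2, e2)
    else if s = 'W' then (spy, n1, s1, w1, e1, n2, s2, w2 + 1, e2)
    else (spy, n1, s1, w1, e1, n2, s2, w2, e2 + 1)

def solve_alt (N : Int) (V1 : Int) (V2 : Int) (steps : String) : String :=
  let st := steps.toList.foldl stepB (true, 0, 0, 0, 0, 0, 0, 0, 0)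
  let (_, n1, s1, w1, e1, n2, s2, w2, e2) := st
  let r := V1 * (s1 - n1) + V2 * (s2 - n2)
  let c := V1 * (e1 - w1) + V2 * (e2 - w2)
  if PySem.Int.mod (max |r| |c|) 2 = 0 then "B" else "W"

-- ===== PRECONDITION & SPEC =====
def Spec_solve (N : Int) (V1 : Int) (V2 : Int) (steps : String) (out : String) : Prop := out = solve_alt N V1 V2 steps
instance (N : Int) (V1 : Int) (V2 : Int) (steps : String) (out : String) : Decidable (Spec_solve N V1 V2 steps out) := by unfold Spec_solve; infer_instance

-- ===== CLAIM (what is proved, stated in full; the proofs are below) =====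
def Claim_equal_solve : Prop := ∀ (N : Int) (V1 : Int) (V2 : Int) (steps : String), Dom_solve N V1 V2 steps → Spec_solve N V1 V2 steps (solve N V1 V2 steps)

-- ===== LEMMAS AND PROOFS =====

-- Maps B's tally state to the A state it represents.
def reprA (V1 V2 : Int) (st : Bool × Int × Int × Int × Int × Int × Int × Int × Int) :
    Int × Bool × Int × Int :=
  let (spy, n1, s1, w1, e1, n2, s2, w2, e2) := st
  ((if spy then V1 else V2), spy,
    V1 * (s1 - n1) + V2 * (s2 - n2), V1 * (e1 - w1) + V2 * (e2 - w2))

theorem stepA_repr (V1 V2 : Int) (st : Bool × Int × Int × Int × Int × Int × Int × Int × Int)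
    (c : Char) : stepA V1 V2 (reprA V1 V2 st) c = reprA V1 V2 (stepB st c) := by
  obtain ⟨spy, n1, s1, w1, e1, n2, s2, w2, e2⟩ := st
  by_cases h1 : c = '*' <;> by_cases h2 : c = 'N' <;> by_cases h3 : c = 'S' <;>
    by_cases h4 : c = 'W' <;> cases spy <;>
    simp only [stepA, stepB, reprA, h1, h2, h3, h4,
      Bool.not_true, Bool.not_false] <;>
    (try subst h1) <;> (try subst h2) <;> (try subst h3) <;> (try subst h4) <;>
    simp_all <;> try ring

theorem fold_rel (V1 V2 : Int) (l : List Char)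
    (st : Bool × Int × Int × Int × Int × Int × Int × Int × Int) :
    l.foldl (stepA V1 V2) (reprA V1 V2 st) = reprA V1 V2 (l.foldl stepB st) := by
  induction l generalizing st with
  | nil => rfl
  | cons c t ih => simp only [List.foldl_cons, stepA_repr, ih]

-- ===== VERDICT (by name: the statement is the Claim_ definition above) =====
theorem solve_spec : Claim_equal_solve := by
  intro N V1 V2 steps _
  unfold Spec_solve solve solve_alt
  have h := fold_rel V1 V2 steps.toList (true, 0, 0, 0, 0, 0, 0, 0, 0)
  have hr : reprA V1 V2 (true, 0, 0, 0, 0, 0, 0, 0, 0) = (V1, true, 0, 0) := by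
    simp [reprA]
  rw [hr] at h
  rw [h]
  obtain ⟨spy, n1, s1, w1, e1, n2, s2, w2, e2⟩ := steps.toList.foldl stepB (true, 0, 0, 0, 0, 0, 0, 0, 0)
  rfl
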